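-- pv_equiv track=rewrite | github.com/theJeremyMoss/splat-pp | img2splat.py | _find_pixel_runs
-- ===== SOURCE A (Python) =====
-- def _find_pixel_runs(sorted_x_coords):
--     """
--     Find runs of consecutive pixel X coordinates
--
--     Args:
--         sorted_x_coords: List of X coordinates sorted in ascending order
--
--     Returns:
--         List of tuples (start_x, end_x) for each run
--     """
--     if not sorted_x_coords:
--         return []
--
--     runs = []
--     start_x = sorted_x_coords[0]
--     prev_x = start_x
--
--     for x in sorted_x_coords[1:]:
--         if x == prev_x + 1:
--             # Continue the current run
--             prev_x = x
--         else:
--             # End the current run and start a new one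
--             runs.append((start_x, prev_x))
--             start_x = x
--             prev_x = x
--
--     # Add the last run
--     runs.append((start_x, prev_x))
--     return runs
-- ===== SOURCE B (Python) =====
-- def _find_pixel_runs(sorted_x_coords):
--     """
--     Find runs of consecutive pixel X coordinates
--
--     Args:
--         sorted_x_coords: List of X coordinates sorted in ascending order
--
--     Returns:
--         List of tuples (start_x, end_x) for each run
--     """
--     if not sorted_x_coords:
--         return []
--     pairs = list(zip(sorted_x_coords, sorted_x_coords[1:]))
--     # a break happens between a and b whenever b is not a + 1
--     starts = [sorted_x_coords[0]] + [b for a, b in pairs if b != a + 1]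
--     ends = [a for a, b in pairs if b != a + 1] + [sorted_x_coords[-1]]
--     return list(zip(starts, ends))
-- ===== Notes on version B (the rewrite author's own statement) =====
-- stated objective: idiomatic
-- what changed: Replaces A's stateful accumulator loop (runs/start_x/prev_x) with a declarative construction: break points are found by filtering adjacent pairs, run starts and ends are built as two comprehensions and zipped together.
import Mathlib
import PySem

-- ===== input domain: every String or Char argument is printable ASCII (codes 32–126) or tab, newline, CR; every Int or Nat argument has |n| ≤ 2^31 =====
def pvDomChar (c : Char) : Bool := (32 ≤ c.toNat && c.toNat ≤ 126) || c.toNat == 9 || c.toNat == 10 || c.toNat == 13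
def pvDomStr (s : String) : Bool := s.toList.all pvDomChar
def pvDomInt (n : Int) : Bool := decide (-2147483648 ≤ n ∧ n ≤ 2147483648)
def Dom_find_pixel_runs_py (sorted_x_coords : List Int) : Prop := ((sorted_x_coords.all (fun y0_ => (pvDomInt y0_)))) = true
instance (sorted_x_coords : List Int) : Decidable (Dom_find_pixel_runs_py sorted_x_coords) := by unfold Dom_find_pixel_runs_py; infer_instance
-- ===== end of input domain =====

-- B replaces A's stateful accumulator loop with a declarative break-point filter + zip construction (idiomatic; same cost).


-- ===== PORT A =====
-- one loop step: `if x == prev_x + 1: prev_x = x else: runs.append((start_x, prev_x)); start_x = x; prev_x = x`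
def pvStepA (acc : List (Int × Int) × Int × Int) (x : Int) : List (Int × Int) × Int × Int :=
  if x = acc.2.2 + 1 then (acc.1, acc.2.1, x)
  else (acc.1 ++ [(acc.2.1, acc.2.2)], x, x)

def find_pixel_runs_py (sorted_x_coords : List Int) : List (Int × Int) :=
  match sorted_x_coords with
  | [] => []
  | x0 :: rest =>
    -- start_x = prev_x = xs[0]; for x in xs[1:]: …; runs.append((start_x, prev_x))
    let acc := rest.foldl pvStepA ([], x0, x0)
    acc.1 ++ [(acc.2.1, acc.2.2)]

-- ===== PORT B =====
-- port of Python's xs[-1] on a nonempty list (head x, tail rest)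
def pvLast (x : Int) (rest : List Int) : Int :=
  match rest with
  | [] => x
  | y :: ys => pvLast y ys

def find_pixel_runs_py_alt (sorted_x_coords : List Int) : List (Int × Int) :=
  match sorted_x_coords with
  | [] => []
  | x0 :: rest =>
    let pairs := (x0 :: rest).zip rest           -- zip(xs, xs[1:])
    let brk := pairs.filter (fun p => decide (p.2 ≠ p.1 + 1))
    let starts := x0 :: brk.map (·.2)
    let ends := brk.map (·.1) ++ [pvLast x0 rest]
    starts.zip ends

-- ===== PRECONDITION & SPEC =====
def Spec_find_pixel_runs_py (sorted_x_coords : List Int) (out : List (Int × Int)) : Prop := out = find_pixel_runs_py_alt sorted_x_coords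
instance (sorted_x_coords : List Int) (out : List (Int × Int)) : Decidable (Spec_find_pixel_runs_py sorted_x_coords out) := by unfold Spec_find_pixel_runs_py; infer_instance

-- ===== CLAIM (what is proved, stated in full; the proofs are below) =====
def Claim_equal_find_pixel_runs_py : Prop := ∀ (sorted_x_coords : List Int), Dom_find_pixel_runs_py sorted_x_coords → Spec_find_pixel_runs_py sorted_x_coords (find_pixel_runs_py sorted_x_coords)

-- ===== LEMMAS AND PROOFS =====

-- loop invariant: A's fold (with pending run (start, prev)) equals the runs already emitted
-- plus B's zip construction over the remaining list viewed as prev :: rest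
theorem pv_key (rest : List Int) (runs : List (Int × Int)) (start prev : Int) :
    (rest.foldl pvStepA (runs, start, prev)).1
      ++ [((rest.foldl pvStepA (runs, start, prev)).2.1, (rest.foldl pvStepA (runs, start, prev)).2.2)]
    = runs ++ (start :: (((prev :: rest).zip rest).filter (fun p => decide (p.2 ≠ p.1 + 1))).map (·.2)).zip
        ((((prev :: rest).zip rest).filter (fun p => decide (p.2 ≠ p.1 + 1))).map (·.1) ++ [pvLast prev rest]) := by
  induction rest generalizing runs start prev with
  | nil => simp [pvLast]
  | cons y ys ih =>
    by_cases h : y = prev + 1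
    · have : pvStepA (runs, start, prev) y = (runs, start, y) := by simp [pvStepA, h]
      simp only [List.foldl_cons, this, List.zip_cons_cons, List.filter_cons, pvLast]
      rw [ih]
      simp [h]
    · have : pvStepA (runs, start, prev) y = (runs ++ [(start, prev)], y, y) := by
        simp [pvStepA, h]
      simp only [List.foldl_cons, this, List.zip_cons_cons, List.filter_cons, pvLast]
      rw [ih]
      simp [h]

-- ===== VERDICT (by name: the statement is the Claim_ definition above) =====
theorem find_pixel_runs_py_spec : Claim_equal_find_pixel_runs_py := by
  intro xs _
  unfold Spec_find_pixel_runs_py find_pixel_runs_py find_pixel_runs_py_alt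
  match xs with
  | [] => rfl
  | x0 :: rest => exact pv_key rest [] x0 x0
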